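-- pv_equiv track=rewrite | github.com/ahmed0z/Cursor_Preset_Comparison_Tool | matching_engine.py | _extract_case_patterns
-- ===== SOURCE A (Python) =====
-- from typing import List, Dict, Tuple, Optional, Any
--
-- def _extract_case_patterns(values: List[str]) -> Dict[str, Any]:
--     """Extract case patterns from values."""
--     patterns = {
--         'all_uppercase': 0,
--         'all_lowercase': 0,
--         'title_case': 0,
--         'mixed_case': 0
--     }
--
--     for value in values:
--         value_str = str(value)
--         if value_str.isupper():
--             patterns['all_uppercase'] += 1
--         elif value_str.islower():
--             patterns['all_lowercase'] += 1
--         elif value_str.istitle():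
--             patterns['title_case'] += 1
--         else:
--             patterns['mixed_case'] += 1
--
--     return patterns
-- ===== SOURCE B (Python) =====
-- def _extract_case_patterns(values):
--     """Classify each value with one hand-written character-pass state machine
--     (no str.isupper/islower/istitle calls) and keep the four counts in an
--     index array; the dict is assembled once at the end."""
--     counts = [0, 0, 0, 0]
--     for v in values:
--         has_up = has_low = seen_cased = prev_cased = False
--         title_ok = True
--         for ch in str(v):
--             if 'A' <= ch <= 'Z':
--                 has_up = True
--                 if prev_cased:
--                     title_ok = False
--                 prev_cased = seen_cased = True
--             elif 'a' <= ch <= 'z':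
--                 has_low = True
--                 if not prev_cased:
--                     title_ok = False
--                 prev_cased = seen_cased = True
--             else:
--                 prev_cased = False
--         if has_up and not has_low:
--             idx = 0
--         elif has_low and not has_up:
--             idx = 1
--         elif title_ok and seen_cased:
--             idx = 2
--         else:
--             idx = 3
--         counts[idx] += 1
--     return dict(zip(('all_uppercase', 'all_lowercase', 'title_case', 'mixed_case'), counts))
-- ===== Notes on version B (the rewrite author's own statement) =====
-- stated objective: alternative
-- what changed: Replaces A's per-value calls to str.isupper/islower/istitle updating a dict with a single hand-written character-level state machine per value (tracking has_up/has_low/title_ok/prev_cased/seen_cased in one scan) whose result indexes a 4-slot count array; the dict is built once from the array at the end.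
import Mathlib
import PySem

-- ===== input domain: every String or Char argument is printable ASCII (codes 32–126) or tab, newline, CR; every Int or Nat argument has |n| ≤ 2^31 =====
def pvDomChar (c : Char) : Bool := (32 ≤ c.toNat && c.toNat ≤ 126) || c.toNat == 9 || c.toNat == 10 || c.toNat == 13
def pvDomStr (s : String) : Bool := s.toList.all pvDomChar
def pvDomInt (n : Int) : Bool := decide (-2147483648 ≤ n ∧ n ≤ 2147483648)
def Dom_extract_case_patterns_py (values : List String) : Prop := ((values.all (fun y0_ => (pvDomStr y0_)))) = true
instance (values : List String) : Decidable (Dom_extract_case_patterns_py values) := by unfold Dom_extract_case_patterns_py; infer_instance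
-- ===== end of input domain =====

-- One honest line: B classifies each value with one hand-written character-pass state machine and an index array of counts, instead of A's per-value str.isupper/islower/istitle calls updating a dict.

-- ===== PORT A =====
-- A-side helpers: Python's str.isupper / str.islower / str.istitle, ported step for step
-- (exact on the ASCII domain; cased chars = letters there)
def pyStrIsUpper (cs : List Char) : Bool :=
  cs.any PySem.Chars.isalpha && cs.all (fun c => !PySem.Chars.islower c)

def pyStrIsLower (cs : List Char) : Bool :=
  cs.any PySem.Chars.isalpha && cs.all (fun c => !PySem.Chars.isupper c)

-- CPython's istitle loop: state = (previous char was cased, some cased char seen)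
def pyTitleGo : List Char → Bool → Bool → Bool
  | [], _, seen => seen
  | c :: rest, prevCased, seen =>
    if PySem.Chars.isupper c then (!prevCased) && pyTitleGo rest true true
    else if PySem.Chars.islower c then prevCased && pyTitleGo rest true true
    else pyTitleGo rest false seen

def pyStrIsTitle (cs : List Char) : Bool := pyTitleGo cs false false

def extract_case_patterns_py (values : List String) : List (String × Int) :=
  let patterns : PySem.Dict String Int :=
    ((((PySem.Dict.empty).insert "all_uppercase" 0).insert "all_lowercase" 0).insert
        "title_case" 0).insert "mixed_case" 0
  let patterns := values.foldl (fun d value =>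
    let s := value.toList
    if pyStrIsUpper s then d.modify "all_uppercase" 0 (· + 1)
    else if pyStrIsLower s then d.modify "all_lowercase" 0 (· + 1)
    else if pyStrIsTitle s then d.modify "title_case" 0 (· + 1)
    else d.modify "mixed_case" 0 (· + 1)) patterns
  patterns.items

-- ===== PORT B =====
-- B's char tests 'A' <= ch <= 'Z' / 'a' <= ch <= 'z', literally
def bUpper (c : Char) : Bool := decide ('A' ≤ c) && decide (c ≤ 'Z')
def bLower (c : Char) : Bool := decide ('a' ≤ c) && decide (c ≤ 'z')

-- B's inner for-loop over the characters: state (has_up, has_low, title_ok, prev_cased, seen_cased)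
def bScan : List Char → Bool → Bool → Bool → Bool → Bool → Bool × Bool × Bool × Bool × Bool
  | [], hu, hl, ok, prev, seen => (hu, hl, ok, prev, seen)
  | c :: rest, hu, hl, ok, prev, seen =>
    if bUpper c then bScan rest true hl (ok && !prev) true true
    else if bLower c then bScan rest hu true (ok && prev) true true
    else bScan rest hu hl ok false seen

-- the bucket index B computes for one value
def bIdx (v : String) : Nat :=
  match bScan v.toList false false true false false with
  | (hu, hl, ok, _, seen) =>
    if hu && !hl then 0 else if hl && !hu then 1 else if ok && seen then 2 else 3

def extract_case_patterns_py_alt (values : List String) : List (String × Int) :=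
  let counts : List Int := values.foldl (fun counts v =>
    let idx := bIdx v
    counts.set idx (counts.getD idx 0 + 1)) [0, 0, 0, 0]
  List.zip ["all_uppercase", "all_lowercase", "title_case", "mixed_case"] counts

-- ===== PRECONDITION & SPEC =====
def Spec_extract_case_patterns_py (values : List String) (out : List (String × Int)) : Prop := out = extract_case_patterns_py_alt values
instance (values : List String) (out : List (String × Int)) : Decidable (Spec_extract_case_patterns_py values out) := by unfold Spec_extract_case_patterns_py; infer_instance

-- ===== CLAIM (what is proved, stated in full; the proofs are below) =====
def Claim_equal_extract_case_patterns_py : Prop := ∀ (values : List String), Dom_extract_case_patterns_py values → Spec_extract_case_patterns_py values (extract_case_patterns_py values)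

-- ===== LEMMAS AND PROOFS =====

-- the key A writes to for a given value: A's elif chain as a function
def catKey (s : List Char) : String :=
  if pyStrIsUpper s then "all_uppercase"
  else if pyStrIsLower s then "all_lowercase"
  else if pyStrIsTitle s then "title_case"
  else "mixed_case"

theorem bUpper_eq (c : Char) : bUpper c = PySem.Chars.isupper c := by
  simp [bUpper, PySem.Chars.isupper]

theorem bLower_eq (c : Char) : bLower c = PySem.Chars.islower c := by
  simp [bLower, PySem.Chars.islower]

theorem alpha_char (c : Char) :
    PySem.Chars.isalpha c = (PySem.Chars.isupper c || PySem.Chars.islower c) := by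
  simp [PySem.Chars.isalpha, PySem.Chars.isupper, PySem.Chars.islower]

theorem lower_of_bLower (c : Char) (h : bLower c = true) : PySem.Chars.islower c = true := by
  rw [← bLower_eq]; exact h

theorem not_lower_of_bUpper (c : Char) (h : bUpper c = true) : PySem.Chars.islower c = false := by
  simp only [bUpper, Bool.and_eq_true, decide_eq_true_eq] at h
  cases hb : PySem.Chars.islower c
  · rfl
  · exfalso
    simp only [PySem.Chars.islower, Bool.and_eq_true, decide_eq_true_eq] at hb
    exact absurd (le_trans hb.1 h.2) (by decide)

theorem bScan_hu : ∀ (cs : List Char) (hu hl ok prev seen : Bool),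
    (bScan cs hu hl ok prev seen).1 = (hu || cs.any PySem.Chars.isupper) := by
  intro cs
  induction cs with
  | nil => intro hu hl ok prev seen; simp [bScan]
  | cons c rest ih =>
    intro hu hl ok prev seen
    rw [bScan]
    split_ifs with h1 h2
    · have hc : PySem.Chars.isupper c = true := by rw [← bUpper_eq]; exact h1
      rw [ih]; simp [List.any_cons, hc]
    · have hc : PySem.Chars.isupper c = false := by rw [← bUpper_eq]; simpa using h1
      rw [ih]; simp [List.any_cons, hc]
    · have hc : PySem.Chars.isupper c = false := by rw [← bUpper_eq]; simpa using h1
      rw [ih]; simp [List.any_cons, hc]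

theorem bScan_hl : ∀ (cs : List Char) (hu hl ok prev seen : Bool),
    (bScan cs hu hl ok prev seen).2.1 = (hl || cs.any PySem.Chars.islower) := by
  intro cs
  induction cs with
  | nil => intro hu hl ok prev seen; simp [bScan]
  | cons c rest ih =>
    intro hu hl ok prev seen
    rw [bScan]
    split_ifs with h1 h2
    · have hc : PySem.Chars.islower c = false := not_lower_of_bUpper c h1
      rw [ih]; simp [List.any_cons, hc]
    · have hc : PySem.Chars.islower c = true := lower_of_bLower c h2
      rw [ih]; simp [List.any_cons, hc]
    · have hc : PySem.Chars.islower c = false := by rw [← bLower_eq]; simpa using h2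
      rw [ih]; simp [List.any_cons, hc]

theorem bScan_title : ∀ (cs : List Char) (hu hl ok prev seen : Bool),
    ((bScan cs hu hl ok prev seen).2.2.1 && (bScan cs hu hl ok prev seen).2.2.2.2)
      = (ok && pyTitleGo cs prev seen) := by
  intro cs
  induction cs with
  | nil => intro hu hl ok prev seen; simp [bScan, pyTitleGo]
  | cons c rest ih =>
    intro hu hl ok prev seen
    rw [bScan, pyTitleGo]
    by_cases h1 : bUpper c = true
    · simp only [h1, if_pos, ← bUpper_eq, ih, Bool.and_assoc]
    · have h1' : PySem.Chars.isupper c = false := by rw [← bUpper_eq]; simpa using h1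
      by_cases h2 : bLower c = true
      · have h2' : PySem.Chars.islower c = true := by rw [← bLower_eq]; exact h2
        simp only [h1, h1', h2, h2', if_pos, Bool.false_eq_true, ite_false, ih, Bool.and_assoc]
      · have h2' : PySem.Chars.islower c = false := by rw [← bLower_eq]; simpa using h2
        simp only [h1, h1', h2, h2', Bool.false_eq_true, ite_false, ih]

theorem any_alpha (cs : List Char) :
    cs.any PySem.Chars.isalpha = (cs.any PySem.Chars.isupper || cs.any PySem.Chars.islower) := by
  induction cs with
  | nil => rfl
  | cons c rest ih =>
    simp only [List.any_cons, ih, alpha_char]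
    cases PySem.Chars.isupper c <;> cases PySem.Chars.islower c <;> simp

theorem all_not_any (cs : List Char) (p : Char → Bool) :
    cs.all (fun c => !p c) = !cs.any p := by
  induction cs with
  | nil => rfl
  | cons c rest ih => simp [List.all_cons, List.any_cons, ih]

theorem upper_char_eq (cs : List Char) :
    (cs.any PySem.Chars.isupper && !cs.any PySem.Chars.islower) = pyStrIsUpper cs := by
  unfold pyStrIsUpper
  rw [any_alpha, all_not_any]
  cases cs.any PySem.Chars.isupper <;> cases cs.any PySem.Chars.islower <;> simp

theorem lower_char_eq (cs : List Char) :
    (cs.any PySem.Chars.islower && !cs.any PySem.Chars.isupper) = pyStrIsLower cs := by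
  unfold pyStrIsLower
  rw [any_alpha, all_not_any]
  cases cs.any PySem.Chars.isupper <;> cases cs.any PySem.Chars.islower <;> simp

theorem bIdx_eq (v : String) :
    bIdx v = (if pyStrIsUpper v.toList then 0 else if pyStrIsLower v.toList then 1
              else if pyStrIsTitle v.toList then 2 else 3) := by
  have h1 := bScan_hu v.toList false false true false false
  have h2 := bScan_hl v.toList false false true false false
  have h3 := bScan_title v.toList false false true false false
  simp only [Bool.false_or] at h1 h2
  simp only [Bool.true_and] at h3
  unfold bIdx
  rcases hsc : bScan v.toList false false true false false with ⟨hu, hl, ok, prev, seen⟩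
  rw [hsc] at h1 h2 h3
  simp only at h1 h2 h3
  dsimp only
  rw [h1, h2, h3, upper_char_eq, lower_char_eq]
  rfl

theorem bIdx_cases (v : String) : bIdx v = 0 ∨ bIdx v = 1 ∨ bIdx v = 2 ∨ bIdx v = 3 := by
  rw [bIdx_eq]; split_ifs <;> simp

-- B's bucket index agrees pointwise with A's elif-chain key
theorem bIdx_catKey (v : String) (i : Nat) (k : String)
    (h : ["all_uppercase", "all_lowercase", "title_case", "mixed_case"].getD i "" = k)
    (hi : i < 4) :
    (decide (bIdx v = i)) = (catKey v.toList == k) := by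
  rw [bIdx_eq]
  unfold catKey
  subst h
  interval_cases i <;> split_ifs <;> decide

def bStep (counts : List Int) (v : String) : List Int :=
  let idx := bIdx v
  counts.set idx (counts.getD idx 0 + 1)

theorem foldB : ∀ (vs : List String) (a b c d : Int),
    vs.foldl bStep [a, b, c, d]
      = [a + (vs.countP (fun v => bIdx v = 0) : Int),
         b + (vs.countP (fun v => bIdx v = 1) : Int),
         c + (vs.countP (fun v => bIdx v = 2) : Int),
         d + (vs.countP (fun v => bIdx v = 3) : Int)] := by
  intro vs
  induction vs with
  | nil => intro a b c d; simp
  | cons v vs ih =>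
    intro a b c d
    rw [List.foldl_cons]
    rcases bIdx_cases v with h | h | h | h <;>
      · simp only [bStep, h, List.set, List.getD, List.countP_cons]
        simp [ih]
        omega

theorem set_update_self {α : Type} [BEq α] [LawfulBEq α] :
    ∀ (l : List α) (s : PySem.Set α), (∀ x ∈ l, x ∈ s) → PySem.Set.update s l = s := by
  intro l
  induction l with
  | nil => intro s _; rfl
  | cons x xs ih =>
    intro s hmem
    have hx : PySem.Set.add s x = s := by
      simp [PySem.Set.add, PySem.Set.contains, hmem x List.mem_cons_self]
    show PySem.Set.update (PySem.Set.add s x) xs = s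
    rw [hx]
    exact ih s (fun y hy => hmem y (List.mem_cons_of_mem _ hy))

theorem catKey_cases (s : List Char) :
    catKey s = "all_uppercase" ∨ catKey s = "all_lowercase" ∨
    catKey s = "title_case" ∨ catKey s = "mixed_case" := by
  unfold catKey; split_ifs <;> simp

theorem ports_eq (values : List String) :
    extract_case_patterns_py values = extract_case_patterns_py_alt values := by
  unfold extract_case_patterns_py extract_case_patterns_py_alt
  have hstep : (fun (d : PySem.Dict String Int) (value : String) =>
      let s := value.toList
      if pyStrIsUpper s then d.modify "all_uppercase" 0 (· + 1)
      else if pyStrIsLower s then d.modify "all_lowercase" 0 (· + 1)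
      else if pyStrIsTitle s then d.modify "title_case" 0 (· + 1)
      else d.modify "mixed_case" 0 (· + 1))
      = fun (d : PySem.Dict String Int) (value : String) =>
          d.modify (catKey value.toList) 0 (· + 1) := by
    funext d v
    show (if pyStrIsUpper v.toList then _ else _) = _
    unfold catKey
    split_ifs <;> rfl
  rw [hstep]
  dsimp only
  rw [← List.foldl_map (f := fun v : String => catKey v.toList)
        (g := fun (d : PySem.Dict String Int) (k : String) => d.modify k 0 (· + 1))]
  set d0 : PySem.Dict String Int :=
    ((((PySem.Dict.empty).insert "all_uppercase" 0).insert "all_lowercase" 0).insert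
        "title_case" 0).insert "mixed_case" 0 with hd0
  set K : List String := values.map (fun v => catKey v.toList) with hK
  have hkeys : (K.foldl (fun d k => d.modify k 0 (· + 1)) d0).keys
      = ["all_uppercase", "all_lowercase", "title_case", "mixed_case"] := by
    have h := PySem.Dict.keys_foldl_modify K (0 : Int) (fun _ _ t => t + 1) d0
    simp only at h
    rw [h]
    have hd0k : d0.keys = ["all_uppercase", "all_lowercase", "title_case", "mixed_case"] := by
      rw [hd0]; decide
    rw [hd0k]
    apply set_update_self
    intro x hx
    rw [hK] at hx
    rcases List.mem_map.mp hx with ⟨v, -, rfl⟩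
    rcases catKey_cases v.toList with h | h | h | h <;> simp [h]
  have hnodup : (K.foldl (fun d k => d.modify k 0 (· + 1)) d0).keys.Nodup := by
    rw [hkeys]; decide
  rw [PySem.Dict.items_eq_map_keys _ hnodup 0, hkeys]
  have hgetD : ∀ k : String, (K.foldl (fun d k => d.modify k 0 (· + 1)) d0).getD k 0
      = d0.getD k 0 + (K.count k : Int) := by
    intro k
    exact PySem.Dict.getD_foldl_modify_add_one K d0 k
  have hcount : ∀ k : String, K.count k = values.countP (fun v => catKey v.toList == k) := by
    intro k
    rw [hK, List.count, List.countP_map]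
    rfl
  -- B side: the fold over the counts array
  show _ = List.zip _ (values.foldl bStep [0, 0, 0, 0])
  rw [foldB]
  have hcnt : ∀ (i : Nat) (k : String),
      ["all_uppercase", "all_lowercase", "title_case", "mixed_case"].getD i "" = k → i < 4 →
      values.countP (fun v => bIdx v = i) = values.countP (fun v => catKey v.toList == k) := by
    intro i k h hi
    refine List.countP_congr fun v _ => ?_
    rw [bIdx_catKey v i k h hi]
  simp only [List.map_cons, List.map_nil, hgetD, hcount]
  have hg : ∀ k : String, d0.getD k 0 = 0 := by
    intro k; rw [hd0]
    simp [PySem.Dict.getD_insert]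
  rw [hg, hg, hg, hg,
    hcnt 0 "all_uppercase" rfl (by omega), hcnt 1 "all_lowercase" rfl (by omega),
    hcnt 2 "title_case" rfl (by omega), hcnt 3 "mixed_case" rfl (by omega)]
  rfl

-- ===== VERDICT (by name: the statement is the Claim_ definition above) =====
theorem extract_case_patterns_py_spec : Claim_equal_extract_case_patterns_py := by
  intro values _
  unfold Spec_extract_case_patterns_py
  exact ports_eq values
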